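-- pv_equiv track=rewrite | github.com/Jasonmellet/GTM_data-enrichment | clients/Broadway/archive/identify_missing_emails.py | is_generic_email
-- ===== SOURCE A (Python) =====
-- def is_generic_email(email):
--     """Check if an email is generic (info@, contact@, etc.)."""
--     if not email or not isinstance(email, str):
--         return False
--
--     generic_prefixes = [
--         "info@", "contact@", "hello@", "admin@", "office@",
--         "support@", "sales@", "help@", "mail@", "enquiry@",
--         "enquiries@", "general@", "webmaster@", "customerservice@"
--     ]
--
--     email = email.lower()
--     return any(email.startswith(prefix) for prefix in generic_prefixes)
-- ===== SOURCE B (Python) =====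
-- def is_generic_email(email):
--     """Check if an email is generic (info@, contact@, etc.)."""
--     if not isinstance(email, str):
--         return False
--
--     generic_locals = {
--         "info", "contact", "hello", "admin", "office",
--         "support", "sales", "help", "mail", "enquiry",
--         "enquiries", "general", "webmaster", "customerservice",
--     }
--
--     local = []
--     for ch in email:
--         if ch == '@':
--             return ''.join(local).lower() in generic_locals
--         local.append(ch)
--     return False
-- ===== Notes on version B (the rewrite author's own statement) =====
-- stated objective: alternative
-- what changed: Replaced A's any()-scan over 14 startswith prefix tests by a single left-to-right character scan that collects the local part up to the first '@' and, on finding '@', tests the lowered local part against a set of bare prefixes (no '@' found: False).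
import Mathlib
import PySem

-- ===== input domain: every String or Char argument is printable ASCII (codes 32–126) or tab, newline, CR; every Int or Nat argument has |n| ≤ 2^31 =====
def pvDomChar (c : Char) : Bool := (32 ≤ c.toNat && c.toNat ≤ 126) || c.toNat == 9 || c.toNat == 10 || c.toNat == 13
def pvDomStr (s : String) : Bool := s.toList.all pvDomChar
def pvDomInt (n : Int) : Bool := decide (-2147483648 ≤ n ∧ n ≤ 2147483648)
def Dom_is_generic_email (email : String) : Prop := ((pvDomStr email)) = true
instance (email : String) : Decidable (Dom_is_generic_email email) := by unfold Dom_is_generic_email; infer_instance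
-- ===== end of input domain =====

-- B replaces A's 14-fold startswith scan by one left-to-right character scan that collects the
-- local part up to the first '@' and tests it (lowered) against a set of bare prefixes
-- (alternative decomposition; same cost class, no speed claim).

-- ===== PORT A =====
def pvGenericPrefixes : List String :=
  ["info@", "contact@", "hello@", "admin@", "office@",
   "support@", "sales@", "help@", "mail@", "enquiry@",
   "enquiries@", "general@", "webmaster@", "customerservice@"]

def is_generic_email (email : String) : Bool :=
  if email = "" then false
  else
    let e := PySem.Str.lower email
    pvGenericPrefixes.any (fun p => PySem.Str.startswith e p)

-- ===== PORT B =====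
def pvGenericLocals : PySem.Set String :=
  PySem.Set.ofList
    ["info", "contact", "hello", "admin", "office",
     "support", "sales", "help", "mail", "enquiry",
     "enquiries", "general", "webmaster", "customerservice"]

-- the 'for ch in email' loop of Source B: scan forward, accumulating the local part (reversed)
def pvScanLocal : List Char → List Char → Bool
  | [], _ => false
  | c :: rest, seen =>
      if c = '@' then
        pvGenericLocals.contains (PySem.Str.lower (String.ofList seen.reverse))
      else
        pvScanLocal rest (c :: seen)

def is_generic_email_alt (email : String) : Bool :=
  pvScanLocal email.toList []

-- ===== PRECONDITION & SPEC =====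
def Spec_is_generic_email (email : String) (out : Bool) : Prop := out = is_generic_email_alt email
instance (email : String) (out : Bool) : Decidable (Spec_is_generic_email email out) := by unfold Spec_is_generic_email; infer_instance

-- ===== CLAIM (what is proved, stated in full; the proofs are below) =====
def Claim_equal_is_generic_email : Prop := ∀ (email : String), Dom_is_generic_email email → Spec_is_generic_email email (is_generic_email email)

-- ===== LEMMAS AND PROOFS =====

theorem lowerChar_at (c : Char) : (PySem.Chars.lowerChar c = '@') ↔ c = '@' := by
  unfold PySem.Chars.lowerChar PySem.Chars.isupper
  split
  · rename_i h
    simp only [Bool.and_eq_true, decide_eq_true_eq, Char.le_def] at h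
    have hA : 65 ≤ c.toNat := h.1
    have hZ : c.toNat ≤ 90 := h.2
    constructor
    · intro he
      exfalso
      have h2 : (Char.ofNat (c.toNat + 32)).toNat = 64 := by rw [he]; rfl
      rw [Char.toNat_ofNat, if_pos (Or.inl (by omega))] at h2
      omega
    · intro he; subst he; exfalso; revert hA; decide
  · simp

theorem mem_at_lower (cs : List Char) : ('@' ∈ PySem.Chars.lower cs) ↔ '@' ∈ cs := by
  unfold PySem.Chars.lower
  simp only [List.mem_map]
  constructor
  · rintro ⟨a, ha, he⟩; rwa [(lowerChar_at a).1 he] at ha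
  · intro h; exact ⟨'@', h, (lowerChar_at '@').2 rfl⟩

theorem takeWhile_lower (cs : List Char) :
    (PySem.Chars.lower cs).takeWhile (· ≠ '@') = PySem.Chars.lower (cs.takeWhile (· ≠ '@')) := by
  unfold PySem.Chars.lower
  rw [List.takeWhile_map]
  have he : ((fun x => decide (x ≠ '@')) ∘ PySem.Chars.lowerChar) = (fun x : Char => decide (x ≠ '@')) := by
    funext x; simp [lowerChar_at]
  rw [he]

theorem lower_ofList (t : List Char) :
    PySem.Str.lower (String.ofList t) = String.ofList (PySem.Chars.lower t) := by
  have h : (PySem.Str.lower (String.ofList t)).toList = PySem.Chars.lower t := by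
    rw [PySem.Str.toList_lower]; simp
  exact String.toList_inj.mp (by rw [h]; simp)

-- the loop invariant of Source B's scan
theorem pvScanLocal_spec (cs acc : List Char) :
    pvScanLocal cs acc =
      if '@' ∈ cs then
        pvGenericLocals.contains
          (PySem.Str.lower (String.ofList (acc.reverse ++ cs.takeWhile (· ≠ '@'))))
      else false := by
  induction cs generalizing acc with
  | nil => simp [pvScanLocal]
  | cons c rest ih =>
    by_cases hc : c = '@'
    · subst hc; simp [pvScanLocal]
    · simp only [pvScanLocal, if_neg hc, ih, List.mem_cons, List.takeWhile_cons]
      rw [if_pos (by simp [hc] : decide (c ≠ '@') = true)]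
      by_cases hm : '@' ∈ rest
      · rw [if_pos hm, if_pos (Or.inr hm)]
        simp
      · rw [if_neg hm, if_neg (by rintro (e | e); exact hc e.symm; exact hm e)]

-- A-side: startswith with a prefix ending in '@' characterised by takeWhile
theorem takeWhileAllAppend (p : Char → Bool) (w t : List Char) (c : Char)
    (hall : ∀ x ∈ w, p x) (hh : ¬ p c) :
    List.takeWhile p (w ++ c :: t) = w := by
  induction w with
  | nil => simp [hh]
  | cons a w ih =>
    have ha := hall a (by simp)
    simp [ha, ih (fun x hx => hall x (by simp [hx]))]

theorem swAt (cs w : List Char) (hw : '@' ∉ w) :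
    PySem.Chars.startswith cs (w ++ ['@']) = ('@' ∈ cs && cs.takeWhile (· ≠ '@') == w) := by
  unfold PySem.Chars.startswith
  by_cases hp : w ++ ['@'] <+: cs
  · obtain ⟨t, ht⟩ := hp
    subst ht
    rw [List.isPrefixOf_iff_prefix.2 ⟨t, rfl⟩]
    have h2 : (w ++ ['@'] ++ t).takeWhile (· ≠ '@') = w := by
      rw [List.append_assoc, List.singleton_append]
      exact takeWhileAllAppend _ w t '@' (fun x hx => by simp; rintro rfl; exact hw hx) (by simp)
    rw [h2]
    simp
  · have hb : (w ++ ['@']).isPrefixOf cs = false :=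
      Bool.eq_false_iff.2 (fun h => hp (List.isPrefixOf_iff_prefix.1 h))
    rw [hb]
    by_cases hm : '@' ∈ cs
    · by_cases hew : cs.takeWhile (· ≠ '@') = w
      case neg =>
        rw [beq_eq_false_iff_ne.2 hew, Bool.and_false]
      case pos =>
        exfalso
        have hne : cs.dropWhile (· ≠ '@') ≠ [] := by
          intro h0
          have := List.takeWhile_append_dropWhile (p := (· ≠ '@')) (l := cs)
          rw [h0, List.append_nil] at this
          rw [← this] at hm
          have := List.mem_takeWhile_imp hm
          simp at this
        have hhead : (cs.dropWhile (· ≠ '@')).head hne = '@' := by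
          have := List.head_dropWhile_not (p := (· ≠ '@')) (l := cs) hne
          simpa using this
        apply hp
        refine ⟨(cs.dropWhile (· ≠ '@')).tail, ?_⟩
        conv_rhs => rw [← List.takeWhile_append_dropWhile (p := (· ≠ '@')) (l := cs)]
        rw [hew, ← List.cons_head_tail hne, hhead]
        simp
    · simp [hm]

theorem swStr (e w p : String) (hw : '@' ∉ w.toList) (hp : p.toList = w.toList ++ ['@']) :
    PySem.Str.startswith e p = ('@' ∈ e.toList && e.toList.takeWhile (· ≠ '@') == w.toList) := by
  rw [PySem.Str.startswith_eq, hp]; exact swAt _ _ hw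

theorem ofListBeq2 (t : List Char) (w : String) :
    decide (String.ofList t = w) = (t == w.toList) := by
  cases h : t == w.toList
  · simp only [beq_eq_false_iff_ne] at h
    simp only [decide_eq_false_iff_not]
    intro he; apply h; rw [← he]; simp
  · simp only [beq_iff_eq] at h
    rw [h]; simp

theorem ab_eq (email : String) : is_generic_email email = is_generic_email_alt email := by
  unfold is_generic_email_alt
  rw [pvScanLocal_spec]
  simp only [List.reverse_nil, List.nil_append]
  by_cases h0 : email = ""
  · subst h0; simp [is_generic_email]
  · simp only [is_generic_email, if_neg h0]
    simp only [pvGenericPrefixes, List.any_cons, List.any_nil]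
    rw [swStr _ "info" _ (by decide) rfl, swStr _ "contact" _ (by decide) rfl,
        swStr _ "hello" _ (by decide) rfl, swStr _ "admin" _ (by decide) rfl,
        swStr _ "office" _ (by decide) rfl, swStr _ "support" _ (by decide) rfl,
        swStr _ "sales" _ (by decide) rfl, swStr _ "help" _ (by decide) rfl,
        swStr _ "mail" _ (by decide) rfl, swStr _ "enquiry" _ (by decide) rfl,
        swStr _ "enquiries" _ (by decide) rfl, swStr _ "general" _ (by decide) rfl,
        swStr _ "webmaster" _ (by decide) rfl, swStr _ "customerservice" _ (by decide) rfl]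
    simp only [PySem.Str.toList_lower, takeWhile_lower, mem_at_lower]
    by_cases hm : '@' ∈ email.toList
    · simp only [hm, decide_true, Bool.true_and, Bool.or_false]
      rw [lower_ofList]
      rw [show pvGenericLocals =
        ["info", "contact", "hello", "admin", "office",
         "support", "sales", "help", "mail", "enquiry",
         "enquiries", "general", "webmaster", "customerservice"] from rfl]
      simp [PySem.Set.contains, ofListBeq2]
    · simp [hm]

-- ===== VERDICT (by name: the statement is the Claim_ definition above) =====
theorem is_generic_email_spec : Claim_equal_is_generic_email := by
  intro email _
  unfold Spec_is_generic_email
  exact ab_eq email
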